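-- pv_equiv track=rewrite | github.com/jblackburne/aoc25 | p05.py | p05b
-- ===== SOURCE A (Python) =====
-- from copy import copy
--
-- def p05b(ranges):
--     ranges = copy(ranges)
--     dedup = []
--     while len(ranges) > 0:
--         rlo, rhi = ranges.pop()
--         disqualified = False
--         for dlo, dhi in dedup:
--             if rlo <= dlo and rhi >= dhi:
--                 ranges.append((rlo, dlo - 1))
--                 ranges.append((dhi + 1, rhi))
--                 disqualified = True
--                 break
--             if dlo <= rlo <= dhi:
--                 rlo = dhi + 1
--             if dlo <= rhi <= dhi:
--                 rhi = dlo - 1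
--             if rhi < rlo:
--                 disqualified = True
--                 break
--         if not disqualified:
--             dedup.append((rlo, rhi))
--
--     return sum(dhi - dlo + 1 for dlo, dhi in dedup)
-- ===== SOURCE B (Python) =====
-- def p05b(ranges):
--     total = 0
--     cur = None
--     for lo, hi in sorted((r for r in ranges if r[0] <= r[1]), key=lambda r: r[0]):
--         if cur is None:
--             cur = (lo, hi)
--         elif lo <= cur[1] + 1:
--             if hi > cur[1]:
--                 cur = (cur[0], hi)
--         else:
--             total += cur[1] - cur[0] + 1
--             cur = (lo, hi)
--     if cur is not None:
--         total += cur[1] - cur[0] + 1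
--     return total
-- ===== Notes on version B (the rewrite author's own statement) =====
-- stated objective: faster
-- what changed: Replaced the stack-based repeated splitting/trimming of ranges against a growing dedup list (worst-case quadratic, re-pushing split pieces) by filtering out reversed pairs, sorting by start and summing during one linear merge sweep.
-- intended difference: On nonempty lists whose last pair is reversed by at least 2 (hi < lo - 1, and not contained in another pair, else A diverges), A counts that trailing reversed range with its negative length (e.g. [(5, 2)] -> -2) while B ignores empty ranges and returns the true union size (0), which is the intended total. — e.g. on p05b([(5, 2)]): A returns -2, B returns 0
import Mathlib
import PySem

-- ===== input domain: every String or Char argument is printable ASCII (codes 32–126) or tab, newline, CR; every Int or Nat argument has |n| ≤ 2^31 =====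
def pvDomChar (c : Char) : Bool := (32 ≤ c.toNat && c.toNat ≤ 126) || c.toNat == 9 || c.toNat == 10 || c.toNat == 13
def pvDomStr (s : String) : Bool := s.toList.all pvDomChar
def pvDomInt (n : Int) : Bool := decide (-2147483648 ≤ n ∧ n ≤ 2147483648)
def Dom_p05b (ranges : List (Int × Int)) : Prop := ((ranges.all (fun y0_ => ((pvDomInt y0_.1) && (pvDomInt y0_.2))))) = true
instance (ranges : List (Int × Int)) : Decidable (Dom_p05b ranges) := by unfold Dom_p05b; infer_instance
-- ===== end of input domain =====

-- B replaces A's stack-based splitting/trimming dedup loop by filter-proper + sort-by-start +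
-- linear merge sweep; Pre_ is exactly A's termination domain, and D_ marks the trailing-reversed-
-- range inputs where A returns a negative-length count and B returns the intended union size.


-- ===== PORT A =====
-- outcome of A's inner `for dlo, dhi in dedup` loop over the popped range (rlo, rhi)
inductive PvInner where
  | split : Int → Int → Int → Int → PvInner   -- full containment: pushes (a,b) and (c,d), disqualified
  | dead : PvInner                            -- disqualified via rhi < rlo
  | alive : Int → Int → PvInner               -- survived the loop with trimmed (rlo, rhi)
deriving DecidableEq, Repr

-- `if dlo <= rlo <= dhi: rlo = dhi + 1`
def pvTrimLo (dlo dhi rlo : Int) : Int := if dlo ≤ rlo ∧ rlo ≤ dhi then dhi + 1 else rlo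
-- `if dlo <= rhi <= dhi: rhi = dlo - 1`
def pvTrimHi (dlo dhi rhi : Int) : Int := if dlo ≤ rhi ∧ rhi ≤ dhi then dlo - 1 else rhi

def pvInner : List (Int × Int) → Int → Int → PvInner
  | [], rlo, rhi => .alive rlo rhi
  | d :: ds, rlo, rhi =>
    if rlo ≤ d.1 ∧ d.2 ≤ rhi then .split rlo (d.1 - 1) (d.2 + 1) rhi
    else if pvTrimHi d.1 d.2 rhi < pvTrimLo d.1 d.2 rlo then .dead
    else pvInner ds (pvTrimLo d.1 d.2 rlo) (pvTrimHi d.1 d.2 rhi)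

-- A's while loop (pop from the end, push split pieces back, append survivors to dedup); the fuel
-- parameter only makes the recursion total — p05b supplies fuel proved sufficient on Pre_
-- (A itself diverges on the inputs Pre_ excludes).
def pvLoop : Nat → List (Int × Int) → List (Int × Int) → List (Int × Int)
  | 0, _, dedup => dedup
  | fuel + 1, ranges, dedup =>
    match ranges.getLast? with
    | none => dedup
    | some (rlo, rhi) =>
      match pvInner dedup rlo rhi with
      | .split a b c d => pvLoop fuel (ranges.dropLast ++ [(a, b), (c, d)]) dedup
      | .dead => pvLoop fuel ranges.dropLast dedup
      | .alive lo hi => pvLoop fuel ranges.dropLast (dedup ++ [(lo, hi)])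

def pvLen (p : Int × Int) : Nat := (p.2 + 1 - p.1).toNat
def pvMu (l : List (Int × Int)) : Nat := 2 * (l.map pvLen).sum + l.length

def p05b (ranges : List (Int × Int)) : Int :=
  ((pvLoop (pvMu ranges + 1) ranges []).map (fun d => d.2 - d.1 + 1)).sum

-- ===== PORT B =====
-- Source B's sweep over the sorted proper ranges: state = (running total, current merged interval or None)
def pvSweep : List (Int × Int) → Int → Option (Int × Int) → Int
  | [], total, none => total
  | [], total, some (cl, ch) => total + (ch - cl + 1)
  | (lo, hi) :: rest, total, none => pvSweep rest total (some (lo, hi))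
  | (lo, hi) :: rest, total, some (cl, ch) =>
    if lo ≤ ch + 1 then
      if ch < hi then pvSweep rest total (some (cl, hi))
      else pvSweep rest total (some (cl, ch))
    else pvSweep rest (total + (ch - cl + 1)) (some (lo, hi))

def p05b_alt (ranges : List (Int × Int)) : Int :=
  pvSweep (PySem.List.sorted (ranges.filter (fun r => decide (r.1 ≤ r.2))) (fun r => r.1) false)
    0 none

-- ===== PRECONDITION & SPEC =====
-- Pre_ is exactly the set of inputs on which A terminates: it excludes only the lists whose last
-- pair is reversed (hi < lo) and contained in some other pair — there A splits forever and never
-- returns; on every other input A returns normally and Pre_ admits it.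
def Pre_p05b (ranges : List (Int × Int)) : Prop :=
  ∀ l ∈ ranges.getLast?, (l.1 ≤ l.2 ∨ ∀ p ∈ ranges.dropLast, ¬(p.1 ≤ l.1 ∧ l.2 ≤ p.2))
instance (ranges : List (Int × Int)) : Decidable (Pre_p05b ranges) := by unfold Pre_p05b; infer_instance
def pvWitness_p05b : (List (Int × Int)) := [(1, 3), (2, 5), (10, 10)]

-- On nonempty lists whose last pair is reversed by at least 2 (hi < lo - 1), A counts that trailing
-- reversed range with its negative length (e.g. [(5, 2)] → -2) while B ignores empty ranges and
-- returns the true union size (0), which is the intended total.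
def D_p05b (ranges : List (Int × Int)) : Prop :=
  (∀ l ∈ ranges.getLast?, l.2 + 1 < l.1) ∧ ranges ≠ []
instance (ranges : List (Int × Int)) : Decidable (D_p05b ranges) := by unfold D_p05b; infer_instance
def Spec_p05b (ranges : List (Int × Int)) (out : Int) : Prop := ¬ D_p05b ranges → out = p05b_alt ranges
instance (ranges : List (Int × Int)) (out : Int) : Decidable (Spec_p05b ranges out) := by unfold Spec_p05b; infer_instance
def pvDiffWitness_p05b : (List (Int × Int)) := [(5, 2)]
def pvDiffWitnessOut_p05b : Int × Int := (-2, 0)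

-- ===== CLAIM (what is proved, stated in full; the proofs are below) =====
def Claim_unchanged_p05b : Prop := ∀ (ranges : List (Int × Int)), Dom_p05b ranges → Pre_p05b ranges → Spec_p05b ranges (p05b ranges)
def Claim_changed_p05b : Prop := Dom_p05b (pvDiffWitness_p05b) ∧ Pre_p05b (pvDiffWitness_p05b) ∧ D_p05b (pvDiffWitness_p05b) ∧ p05b (pvDiffWitness_p05b) = pvDiffWitnessOut_p05b.1 ∧ p05b_alt (pvDiffWitness_p05b) = pvDiffWitnessOut_p05b.2 ∧ pvDiffWitnessOut_p05b.1 ≠ pvDiffWitnessOut_p05b.2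
def Claim_exact_p05b : Prop := ∀ (ranges : List (Int × Int)), Dom_p05b ranges → Pre_p05b ranges → D_p05b ranges → p05b ranges ≠ p05b_alt ranges

-- ===== LEMMAS AND PROOFS =====

-- the set of integers covered by a list of inclusive ranges (a reversed pair covers nothing)
noncomputable def pvU (l : List (Int × Int)) : Finset Int :=
  l.foldr (fun p s => Finset.Icc p.1 p.2 ∪ s) ∅

theorem pvU_nil : pvU [] = ∅ := rfl

theorem pvU_cons (q : Int × Int) (t : List (Int × Int)) :
    pvU (q :: t) = Finset.Icc q.1 q.2 ∪ pvU t := rfl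

theorem pvU_cons' (a b : Int) (t : List (Int × Int)) :
    pvU ((a, b) :: t) = Finset.Icc a b ∪ pvU t := rfl

theorem mem_pvU (l : List (Int × Int)) (x : Int) :
    x ∈ pvU l ↔ ∃ p ∈ l, p.1 ≤ x ∧ x ≤ p.2 := by
  induction l with
  | nil => simp [pvU]
  | cons q t ih => simp [pvU_cons, Finset.mem_union, Finset.mem_Icc] at *; aesop

theorem pvU_append (a b : List (Int × Int)) : pvU (a ++ b) = pvU a ∪ pvU b := by
  ext x; simp [mem_pvU, Finset.mem_union]; aesop

theorem pvU_perm {a b : List (Int × Int)} (h : a.Perm b) : pvU a = pvU b := by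
  ext x; simp only [mem_pvU]
  constructor <;> rintro ⟨p, hp, hx⟩
  · exact ⟨p, h.mem_iff.mp hp, hx⟩
  · exact ⟨p, h.mem_iff.mpr hp, hx⟩

theorem pvU_filter (l : List (Int × Int)) :
    pvU (l.filter (fun r => decide (r.1 ≤ r.2))) = pvU l := by
  ext x
  simp only [mem_pvU, List.mem_filter, decide_eq_true_eq]
  constructor
  · rintro ⟨p, ⟨hp, _⟩, hx⟩; exact ⟨p, hp, hx⟩
  · rintro ⟨p, hp, hx⟩; exact ⟨p, ⟨hp, by omega⟩, hx⟩

theorem pvDisjoint_pvU (s : Finset Int) (l : List (Int × Int))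
    (h : ∀ p ∈ l, Disjoint s (Finset.Icc p.1 p.2)) : Disjoint s (pvU l) := by
  rw [Finset.disjoint_left]
  intro x hx hl
  rw [mem_pvU] at hl
  obtain ⟨p, hp, h1, h2⟩ := hl
  exact (Finset.disjoint_left.mp (h p hp)) hx (Finset.mem_Icc.mpr ⟨h1, h2⟩)

-- trim-step facts (d proper, no full containment)
theorem pvTrim_le (dlo dhi rlo rhi : Int) :
    rlo ≤ pvTrimLo dlo dhi rlo ∧ pvTrimHi dlo dhi rhi ≤ rhi := by
  unfold pvTrimLo pvTrimHi; split_ifs <;> omega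

theorem pvTrim_union (dlo dhi rlo rhi : Int) (hd : dlo ≤ dhi)
    (hc : ¬(rlo ≤ dlo ∧ dhi ≤ rhi)) (x : Int) :
    (rlo ≤ x ∧ x ≤ rhi ∨ dlo ≤ x ∧ x ≤ dhi) ↔
      (pvTrimLo dlo dhi rlo ≤ x ∧ x ≤ pvTrimHi dlo dhi rhi ∨ dlo ≤ x ∧ x ≤ dhi) := by
  unfold pvTrimLo pvTrimHi; split_ifs <;> omega

theorem pvTrim_disjoint (dlo dhi rlo rhi : Int) (hd : dlo ≤ dhi)
    (hc : ¬(rlo ≤ dlo ∧ dhi ≤ rhi)) (x : Int)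
    (h1 : pvTrimLo dlo dhi rlo ≤ x) (h2 : x ≤ pvTrimHi dlo dhi rhi) :
    ¬(dlo ≤ x ∧ x ≤ dhi) := by
  revert h1 h2; unfold pvTrimLo pvTrimHi; split_ifs <;> omega

-- propositional shapes of the pointwise union arguments (abstract atoms keep `tauto` fast)
theorem pvIff_alive {L T DQ P R : Prop} (h1 : L ∨ P ↔ T ∨ P) (h2 : R ∨ DQ ↔ T ∨ DQ) :
    L ∨ (DQ ∨ P) ↔ R ∨ (DQ ∨ P) := by tauto

theorem pvIff_split {A C T DQ P R : Prop} (h1 : A ∨ (C ∨ P) ↔ T ∨ P) (h2 : R ∨ DQ ↔ T ∨ DQ) :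
    A ∨ (C ∨ (DQ ∨ P)) ↔ R ∨ (DQ ∨ P) := by tauto

theorem pvIff_loop_split {D A C T P : Prop} (h1 : A ∨ (C ∨ P) ↔ T ∨ P) :
    (D ∨ (A ∨ C)) ∨ P ↔ (D ∨ T) ∨ P := by tauto

theorem pvIff_loop_alive {D L T P : Prop} (h1 : L ∨ P ↔ T ∨ P) :
    D ∨ (P ∨ L) ↔ (D ∨ T) ∨ P := by tauto

set_option maxHeartbeats 1000000 in
theorem pvInner_spec (ds : List (Int × Int)) : ∀ (rlo rhi : Int),
    (∀ d ∈ ds, d.1 ≤ d.2) →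
    (pvInner ds rlo rhi = .dead → Finset.Icc rlo rhi ⊆ pvU ds) ∧
    (∀ lo hi, pvInner ds rlo rhi = .alive lo hi →
      (Finset.Icc lo hi ∪ pvU ds = Finset.Icc rlo rhi ∪ pvU ds) ∧
      (∀ d ∈ ds, Disjoint (Finset.Icc lo hi) (Finset.Icc d.1 d.2)) ∧
      rlo ≤ lo ∧ hi ≤ rhi ∧ (ds = [] ∧ lo = rlo ∧ hi = rhi ∨ lo ≤ hi)) ∧
    (∀ a b c d, pvInner ds rlo rhi = .split a b c d →
      (Finset.Icc a b ∪ (Finset.Icc c d ∪ pvU ds) = Finset.Icc rlo rhi ∪ pvU ds) ∧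
      rlo ≤ a ∧ d ≤ rhi ∧ ∃ q ∈ ds, b = q.1 - 1 ∧ c = q.2 + 1 ∧ a ≤ q.1 ∧ q.2 ≤ d) := by
  induction ds with
  | nil =>
    intro rlo rhi _
    refine ⟨by simp [pvInner], ?_, by simp [pvInner]⟩
    intro lo hi h
    simp only [pvInner, PvInner.alive.injEq] at h
    obtain ⟨rfl, rfl⟩ := h
    exact ⟨rfl, by simp, le_refl _, le_refl _, Or.inl ⟨rfl, rfl, rfl⟩⟩
  | cons q t ih =>
    obtain ⟨dlo, dhi⟩ := q
    intro rlo rhi hds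
    have hd : dlo ≤ dhi := hds (dlo, dhi) (by simp)
    have hds' : ∀ d ∈ t, d.1 ≤ d.2 := fun d hdm => hds d (by simp [hdm])
    by_cases hc : rlo ≤ dlo ∧ dhi ≤ rhi
    · refine ⟨fun h => absurd h (by simp only [pvInner, if_pos hc]; simp),
        fun lo hi h => absurd h (by simp only [pvInner, if_pos hc]; simp), ?_⟩
      intro a b c d h
      simp only [pvInner, if_pos hc, PvInner.split.injEq] at h
      obtain ⟨rfl, rfl, rfl, rfl⟩ := h
      refine ⟨?_, le_refl _, le_refl _, (dlo, dhi), by simp, rfl, rfl, hc.1, hc.2⟩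
      ext x
      simp only [Finset.mem_union, Finset.mem_Icc, pvU_cons]
      by_cases hP : x ∈ pvU t <;> simp [hP] <;> omega
    · have hstep : pvInner ((dlo, dhi) :: t) rlo rhi =
          if pvTrimHi dlo dhi rhi < pvTrimLo dlo dhi rlo then .dead
          else pvInner t (pvTrimLo dlo dhi rlo) (pvTrimHi dlo dhi rhi) := by
        simp only [pvInner, if_neg hc]
      have hA := (pvTrim_le dlo dhi rlo rhi).1
      have hB := (pvTrim_le dlo dhi rlo rhi).2
      have hE1 := pvTrim_union dlo dhi rlo rhi hd hc
      have hE2 := pvTrim_disjoint dlo dhi rlo rhi hd hc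
      by_cases hdead : pvTrimHi dlo dhi rhi < pvTrimLo dlo dhi rlo
      · rw [if_pos hdead] at hstep
        refine ⟨?_, fun lo hi h => absurd (hstep ▸ h) (by simp),
          fun a b c d h => absurd (hstep ▸ h) (by simp)⟩
        intro _ x hx
        rw [Finset.mem_Icc] at hx
        have := (hE1 x).mp (Or.inl hx)
        rw [pvU_cons, Finset.mem_union, Finset.mem_Icc]
        rcases this with h | h
        · omega
        · exact Or.inl h
      · rw [if_neg hdead] at hstep
        obtain ⟨ihD, ihA, ihS⟩ := ih (pvTrimLo dlo dhi rlo) (pvTrimHi dlo dhi rhi) hds'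
        refine ⟨?_, ?_, ?_⟩
        · -- dead
          rw [hstep]; intro h x hx
          have hsub := ihD h
          rw [Finset.mem_Icc] at hx
          rw [pvU_cons, Finset.mem_union, Finset.mem_Icc]
          rcases (hE1 x).mp (Or.inl hx) with h' | h'
          · exact Or.inr (hsub (Finset.mem_Icc.mpr h'))
          · exact Or.inl h'
        · -- alive
          rw [hstep]; intro lo hi h
          obtain ⟨hU, hdisj, hlo, hhi, hcase⟩ := ihA lo hi h
          have hlohi : lo ≤ hi := by
            rcases hcase with ⟨_, rfl, rfl⟩ | h' <;> omega
          refine ⟨?_, ?_, by omega, by omega, Or.inr hlohi⟩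
          · ext x
            have h1 := Finset.ext_iff.mp hU x
            have h2 := hE1 x
            simp only [pvU_cons, Finset.mem_union, Finset.mem_Icc] at h1 h2 ⊢
            exact pvIff_alive h1 h2
          · intro d hdm
            rcases List.mem_cons.mp hdm with rfl | hdm'
            · rw [Finset.disjoint_left]
              intro x hx
              rw [Finset.mem_Icc] at hx
              rw [Finset.mem_Icc]
              exact hE2 x (by omega) (by omega)
            · exact hdisj d hdm'
        · -- split
          rw [hstep]; intro a b c d h
          obtain ⟨hU, ha, hb, q, hq, hrest⟩ := ihS a b c d h
          refine ⟨?_, by omega, by omega, q, by simp [hq], hrest⟩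
          ext x
          have h1 := Finset.ext_iff.mp hU x
          have h2 := hE1 x
          simp only [pvU_cons, Finset.mem_union, Finset.mem_Icc] at h1 h2 ⊢
          exact pvIff_split h1 h2

-- an uncovered reversed first dedup entry is transparent to the inner loop
theorem pvInner_skip (s : Int × Int) (ds : List (Int × Int)) (rlo rhi : Int)
    (hs : s.2 < s.1) (hnc : ¬(rlo ≤ s.1 ∧ s.2 ≤ rhi)) :
    pvInner (s :: ds) rlo rhi = if rhi < rlo then .dead else pvInner ds rlo rhi := by
  obtain ⟨s1, s2⟩ := s
  simp only at hs hnc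
  have h1 : pvTrimLo s1 s2 rlo = rlo := by unfold pvTrimLo; split_ifs <;> omega
  have h2 : pvTrimHi s1 s2 rhi = rhi := by unfold pvTrimHi; split_ifs <;> omega
  simp only [pvInner, if_neg hnc, h1, h2]

theorem pvMu_append (a b : List (Int × Int)) : pvMu (a ++ b) = pvMu a + pvMu b := by
  simp [pvMu, List.map_append, List.sum_append]; ring

set_option maxHeartbeats 1000000 in
theorem pvLoop_spec (fuel : Nat) : ∀ (ranges pre dedup : List (Int × Int)),
    pvMu ranges < fuel →
    (pre = [] ∨ ∃ s : Int × Int, pre = [s] ∧ s.2 < s.1 ∧ ∀ r ∈ ranges, ¬(r.1 ≤ s.1 ∧ s.2 ≤ r.2)) →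
    (∀ d ∈ dedup, d.1 ≤ d.2) →
    dedup.Pairwise (fun a b => Disjoint (Finset.Icc a.1 a.2) (Finset.Icc b.1 b.2)) →
    (pre = [] → dedup = [] → ∀ l ∈ ranges.getLast?, l.1 ≤ l.2) →
    ∃ dedup', pvLoop fuel ranges (pre ++ dedup) = pre ++ dedup' ∧
      (∀ d ∈ dedup', d.1 ≤ d.2) ∧
      dedup'.Pairwise (fun a b => Disjoint (Finset.Icc a.1 a.2) (Finset.Icc b.1 b.2)) ∧
      pvU dedup' = pvU ranges ∪ pvU dedup := by
  induction fuel with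
  | zero => intro ranges pre dedup hfu; omega
  | succ n ih =>
    intro ranges pre dedup hfu hpre hprop hpw hemp
    match hlast : ranges.getLast? with
    | none =>
      have hnil : ranges = [] := List.getLast?_eq_none_iff.mp hlast
      subst hnil
      exact ⟨dedup, by simp [pvLoop], hprop, hpw, by simp [pvU_nil]⟩
    | some (rlo, rhi) =>
      have hne : ranges ≠ [] := by intro e; rw [e] at hlast; simp at hlast
      have hget : ranges.getLast hne = (rlo, rhi) := by
        have := List.getLast?_eq_some_getLast hne
        rw [hlast] at this; exact (Option.some_inj.mp this).symm
      have hsplit : ranges.dropLast ++ [(rlo, rhi)] = ranges := by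
        rw [← hget]; exact List.dropLast_append_getLast hne
      have hmu : pvMu ranges = pvMu ranges.dropLast + 2 * pvLen (rlo, rhi) + 1 := by
        conv_lhs => rw [← hsplit]
        rw [pvMu_append]; simp [pvMu, pvLen]; ring
      have hmemdrop : ∀ r ∈ ranges.dropLast, r ∈ ranges := by
        intro r hr
        rw [← hsplit]; exact List.mem_append_left _ hr
      have hUr : pvU ranges = pvU ranges.dropLast ∪ Finset.Icc rlo rhi := by
        conv_lhs => rw [← hsplit]
        rw [pvU_append]; simp [pvU_cons, pvU_nil]
      rcases hpre with rfl | ⟨s, rfl, hs, hsc⟩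
      · -- no reversed first entry: dedup list is just `dedup`
        simp only [List.nil_append]
        match hin : pvInner dedup rlo rhi with
        | .split a b c d =>
          obtain ⟨hU, ha, hbd, q, hq, hqb, hqc, haq, hqd⟩ :=
            ((pvInner_spec dedup rlo rhi hprop).2.2 a b c d hin)
          have hqprop : q.1 ≤ q.2 := hprop q hq
          have hdne : dedup ≠ [] := by intro e; rw [e] at hq; simp at hq
          have hlen : pvLen (a, b) + pvLen (c, d) + 1 ≤ pvLen (rlo, rhi) := by
            simp only [pvLen]; omega
          have hx2 : pvMu [(a, b), (c, d)] = 2 * (pvLen (a, b) + pvLen (c, d)) + 2 := by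
            simp only [pvMu, List.map_cons, List.map_nil, List.sum_cons, List.sum_nil,
              List.length_cons, List.length_nil]
            omega
          have hmu' : pvMu (ranges.dropLast ++ [(a, b), (c, d)]) < n := by
            rw [pvMu_append, hx2]
            omega
          obtain ⟨dd, e1, e2, e3, e4⟩ := ih (ranges.dropLast ++ [(a, b), (c, d)]) [] dedup hmu'
            (Or.inl rfl) hprop hpw (fun _ e => absurd e hdne)
          refine ⟨dd, ?_, e2, e3, ?_⟩
          · simp only [pvLoop, hlast, hin]
            exact e1
          · rw [e4, pvU_append, hUr]
            ext x
            have h1 := Finset.ext_iff.mp hU x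
            simp only [pvU_cons, pvU_nil, Finset.mem_union, Finset.union_empty] at h1 ⊢
            exact pvIff_loop_split h1
        | .dead =>
          have hsub := (pvInner_spec dedup rlo rhi hprop).1 hin
          have hdne : dedup ≠ [] := by
            intro e; rw [e] at hin; exact PvInner.noConfusion hin
          obtain ⟨dd, e1, e2, e3, e4⟩ := ih ranges.dropLast [] dedup (by omega)
            (Or.inl rfl) hprop hpw (fun _ e => absurd e hdne)
          refine ⟨dd, ?_, e2, e3, ?_⟩
          · simp only [pvLoop, hlast, hin]
            exact e1
          · rw [e4, hUr]
            ext x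
            simp only [Finset.mem_union]
            constructor
            · rintro (h | h)
              · exact Or.inl (Or.inl h)
              · exact Or.inr h
            · rintro ((h | h) | h)
              · exact Or.inl h
              · exact Or.inr (hsub h)
              · exact Or.inr h
        | .alive lo hi =>
          obtain ⟨hU, hdisj, hlo, hhi, hcase⟩ :=
            (pvInner_spec dedup rlo rhi hprop).2.1 lo hi hin
          have hlh : lo ≤ hi := by
            rcases hcase with ⟨hde, he1, he2⟩ | h'
            · have hm := hemp rfl hde (rlo, rhi) (by rw [Option.mem_def, hlast])
              simp only at hm
              omega
            · exact h'
          have hprop' : ∀ d ∈ dedup ++ [(lo, hi)], d.1 ≤ d.2 := by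
            intro d hd
            rcases List.mem_append.mp hd with h' | h'
            · exact hprop d h'
            · rw [List.mem_singleton.mp h']; exact hlh
          have hpw' : (dedup ++ [(lo, hi)]).Pairwise
              (fun a b => Disjoint (Finset.Icc a.1 a.2) (Finset.Icc b.1 b.2)) := by
            rw [List.pairwise_append]
            refine ⟨hpw, by simp, ?_⟩
            intro a ha b hb
            rw [List.mem_singleton.mp hb]
            exact (hdisj a ha).symm
          obtain ⟨dd, e1, e2, e3, e4⟩ := ih ranges.dropLast [] (dedup ++ [(lo, hi)]) (by omega)
            (Or.inl rfl) hprop' hpw' (fun _ e => absurd e (by simp))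
          refine ⟨dd, ?_, e2, e3, ?_⟩
          · simp only [pvLoop, hlast, hin]
            exact e1
          · rw [e4, pvU_append, hUr]
            ext x
            have h1 := Finset.ext_iff.mp hU x
            simp only [pvU_cons, pvU_nil, Finset.mem_union, Finset.union_empty] at h1 ⊢
            exact pvIff_loop_alive h1
      · -- reversed first entry s: transparent to every popped range
        simp only [List.cons_append, List.nil_append]
        have hncr : ¬(rlo ≤ s.1 ∧ s.2 ≤ rhi) :=
          hsc (rlo, rhi) (by rw [← hsplit]; simp)
        have hskip := pvInner_skip s dedup rlo rhi hs hncr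
        have hsc' : ∀ r ∈ ranges.dropLast, ¬(r.1 ≤ s.1 ∧ s.2 ≤ r.2) :=
          fun r hr => hsc r (hmemdrop r hr)
        by_cases himp : rhi < rlo
        · -- reversed popped range dies immediately
          rw [if_pos himp] at hskip
          obtain ⟨dd, e1, e2, e3, e4⟩ := ih ranges.dropLast [s] dedup (by omega)
            (Or.inr ⟨s, rfl, hs, hsc'⟩) hprop hpw (fun e => absurd e (by simp))
          refine ⟨dd, ?_, e2, e3, ?_⟩
          · simp only [pvLoop, hlast, hskip]
            simpa using e1
          · rw [e4, hUr, Finset.Icc_eq_empty (by omega), Finset.union_empty]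
        · rw [if_neg himp] at hskip
          match hin : pvInner dedup rlo rhi with
          | .split a b c d =>
            obtain ⟨hU, ha, hbd, q, hq, hqb, hqc, haq, hqd⟩ :=
              ((pvInner_spec dedup rlo rhi hprop).2.2 a b c d hin)
            have hqprop : q.1 ≤ q.2 := hprop q hq
            have hlen : pvLen (a, b) + pvLen (c, d) + 1 ≤ pvLen (rlo, rhi) := by
              simp only [pvLen]; omega
            have hx2 : pvMu [(a, b), (c, d)] = 2 * (pvLen (a, b) + pvLen (c, d)) + 2 := by
              simp only [pvMu, List.map_cons, List.map_nil, List.sum_cons, List.sum_nil,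
                List.length_cons, List.length_nil]
              omega
            have hmu' : pvMu (ranges.dropLast ++ [(a, b), (c, d)]) < n := by
              rw [pvMu_append, hx2]
              omega
            have hsc'' : ∀ r ∈ ranges.dropLast ++ [(a, b), (c, d)], ¬(r.1 ≤ s.1 ∧ s.2 ≤ r.2) := by
              intro r hr
              rcases List.mem_append.mp hr with h' | h'
              · exact hsc' r h'
              · intro hcov
                apply hncr
                rcases List.mem_cons.mp h' with rfl | h''
                · exact ⟨by omega, by simp only at hcov; omega⟩
                · rw [List.mem_singleton.mp h''] at hcov
                  exact ⟨by simp only at hcov; omega, by simp only at hcov; omega⟩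
            obtain ⟨dd, e1, e2, e3, e4⟩ := ih (ranges.dropLast ++ [(a, b), (c, d)]) [s] dedup hmu'
              (Or.inr ⟨s, rfl, hs, hsc''⟩) hprop hpw (fun e => absurd e (by simp))
            refine ⟨dd, ?_, e2, e3, ?_⟩
            · simp only [pvLoop, hlast, hskip, hin]
              simpa using e1
            · rw [e4, pvU_append, hUr]
              ext x
              have h1 := Finset.ext_iff.mp hU x
              simp only [pvU_cons, pvU_nil, Finset.mem_union, Finset.union_empty] at h1 ⊢
              exact pvIff_loop_split h1
          | .dead =>
            have hsub := (pvInner_spec dedup rlo rhi hprop).1 hin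
            obtain ⟨dd, e1, e2, e3, e4⟩ := ih ranges.dropLast [s] dedup (by omega)
              (Or.inr ⟨s, rfl, hs, hsc'⟩) hprop hpw (fun e => absurd e (by simp))
            refine ⟨dd, ?_, e2, e3, ?_⟩
            · simp only [pvLoop, hlast, hskip, hin]
              simpa using e1
            · rw [e4, hUr]
              ext x
              simp only [Finset.mem_union]
              constructor
              · rintro (h | h)
                · exact Or.inl (Or.inl h)
                · exact Or.inr h
              · rintro ((h | h) | h)
                · exact Or.inl h
                · exact Or.inr (hsub h)
                · exact Or.inr h
          | .alive lo hi =>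
            obtain ⟨hU, hdisj, hlo, hhi, hcase⟩ :=
              (pvInner_spec dedup rlo rhi hprop).2.1 lo hi hin
            have hlh : lo ≤ hi := by
              rcases hcase with ⟨hde, he1, he2⟩ | h' <;> omega
            have hprop' : ∀ d ∈ dedup ++ [(lo, hi)], d.1 ≤ d.2 := by
              intro d hd
              rcases List.mem_append.mp hd with h' | h'
              · exact hprop d h'
              · rw [List.mem_singleton.mp h']; exact hlh
            have hpw' : (dedup ++ [(lo, hi)]).Pairwise
                (fun a b => Disjoint (Finset.Icc a.1 a.2) (Finset.Icc b.1 b.2)) := by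
              rw [List.pairwise_append]
              refine ⟨hpw, by simp, ?_⟩
              intro a ha b hb
              rw [List.mem_singleton.mp hb]
              exact (hdisj a ha).symm
            obtain ⟨dd, e1, e2, e3, e4⟩ := ih ranges.dropLast [s] (dedup ++ [(lo, hi)]) (by omega)
              (Or.inr ⟨s, rfl, hs, hsc'⟩) hprop' hpw' (fun e => absurd e (by simp))
            refine ⟨dd, ?_, e2, e3, ?_⟩
            · simp only [pvLoop, hlast, hskip, hin]
              rw [show (s :: dedup) ++ [(lo, hi)] = s :: (dedup ++ [(lo, hi)]) from by simp]
              simpa using e1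
            · rw [e4, pvU_append, hUr]
              ext x
              have h1 := Finset.ext_iff.mp hU x
              simp only [pvU_cons, pvU_nil, Finset.mem_union, Finset.union_empty] at h1 ⊢
              exact pvIff_loop_alive h1

theorem pvSum_card (l : List (Int × Int)) (hp : ∀ p ∈ l, p.1 ≤ p.2)
    (hd : l.Pairwise (fun a b => Disjoint (Finset.Icc a.1 a.2) (Finset.Icc b.1 b.2))) :
    (l.map (fun d => d.2 - d.1 + 1)).sum = ((pvU l).card : Int) := by
  induction l with
  | nil => simp [pvU_nil]
  | cons q t ih =>
    rw [List.pairwise_cons] at hd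
    have hdisj : Disjoint (Finset.Icc q.1 q.2) (pvU t) :=
      pvDisjoint_pvU _ _ (fun p hp' => hd.1 p hp')
    have hq : q.1 ≤ q.2 := hp q (by simp)
    rw [List.map_cons, List.sum_cons, pvU_cons, Finset.card_union_of_disjoint hdisj,
      ih (fun p hp' => hp p (by simp [hp'])) hd.2, Int.card_Icc]
    push_cast
    omega

-- A's extra contribution: the trailing reversed range, counted with its (nonpositive) length
def pvExtra (ranges : List (Int × Int)) : Int :=
  match ranges.getLast? with
  | none => 0
  | some l => if l.2 < l.1 then l.2 - l.1 + 1 else 0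

theorem pvExtra_some (ranges : List (Int × Int)) (l : Int × Int)
    (h : ranges.getLast? = some l) :
    pvExtra ranges = if l.2 < l.1 then l.2 - l.1 + 1 else 0 := by
  unfold pvExtra; rw [h]

theorem p05b_val (ranges : List (Int × Int)) (hpre : Pre_p05b ranges) :
    p05b ranges = pvExtra ranges + ((pvU ranges).card : Int) := by
  unfold p05b
  match hlast : ranges.getLast? with
  | none =>
    have hnil : ranges = [] := List.getLast?_eq_none_iff.mp hlast
    subst hnil
    simp [pvLoop, pvMu, pvExtra, pvU_nil]
  | some l =>
    obtain ⟨llo, lhi⟩ := l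
    have hne : ranges ≠ [] := by intro e; rw [e] at hlast; simp at hlast
    have hget : ranges.getLast hne = (llo, lhi) := by
      have := List.getLast?_eq_some_getLast hne
      rw [hlast] at this; exact (Option.some_inj.mp this).symm
    have hsplit : ranges.dropLast ++ [(llo, lhi)] = ranges := by
      rw [← hget]; exact List.dropLast_append_getLast hne
    have hmu : pvMu ranges = pvMu ranges.dropLast + 2 * pvLen (llo, lhi) + 1 := by
      conv_lhs => rw [← hsplit]
      rw [pvMu_append]; simp [pvMu, pvLen]; ring
    have hUr : pvU ranges = pvU ranges.dropLast ∪ Finset.Icc llo lhi := by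
      conv_lhs => rw [← hsplit]
      rw [pvU_append]; simp [pvU_cons, pvU_nil]
    have hEx : pvExtra ranges = if lhi < llo then lhi - llo + 1 else 0 :=
      pvExtra_some ranges (llo, lhi) hlast
    by_cases hproper : llo ≤ lhi
    · obtain ⟨dd, e1, e2, e3, e4⟩ := pvLoop_spec (pvMu ranges + 1) ranges [] [] (by omega)
        (Or.inl rfl) (by simp) (by simp)
        (fun _ _ => by
          intro l hl
          rw [Option.mem_def, hlast] at hl
          obtain rfl := Option.some_inj.mp hl.symm
          exact hproper)
      simp only [List.nil_append] at e1
      rw [e1, pvSum_card dd e2 e3, e4, pvU_nil, Finset.union_empty, hEx, if_neg (by omega)]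
      omega
    · -- trailing reversed range: unroll the first iteration, then run with pre = [(llo, lhi)]
      have hsc : ∀ r ∈ ranges.dropLast, ¬(r.1 ≤ llo ∧ lhi ≤ r.2) := by
        have := hpre (llo, lhi) (by rw [Option.mem_def, hlast])
        rcases this with h | h
        · omega
        · exact h
      have hstep : pvLoop (pvMu ranges + 1) ranges [] =
          pvLoop (pvMu ranges) ranges.dropLast [(llo, lhi)] := by
        have h0 : pvMu ranges = (pvMu ranges - 1) + 1 := by omega
        rw [h0]
        simp only [pvLoop, hlast, pvInner, List.nil_append]
      obtain ⟨dd, e1, e2, e3, e4⟩ := pvLoop_spec (pvMu ranges) ranges.dropLast [(llo, lhi)] []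
        (by omega) (Or.inr ⟨(llo, lhi), rfl, by simp; omega, hsc⟩) (by simp) (by simp)
        (fun e => absurd e (by simp))
      simp only [List.append_nil, List.cons_append, List.nil_append] at e1
      rw [hstep, e1, List.map_cons, List.sum_cons, pvSum_card dd e2 e3, e4, pvU_nil,
        Finset.union_empty, hUr, Finset.Icc_eq_empty (by omega), Finset.union_empty, hEx,
        if_pos (by omega)]

theorem pvSweep_some (l : List (Int × Int)) : ∀ (total cl ch : Int),
    (∀ p ∈ l, p.1 ≤ p.2) → cl ≤ ch → (∀ p ∈ l, cl ≤ p.1) →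
    l.Pairwise (fun a b => a.1 ≤ b.1) →
    pvSweep l total (some (cl, ch)) = total + ((Finset.Icc cl ch ∪ pvU l).card : Int) := by
  induction l with
  | nil =>
    intro total cl ch _ hcl _ _
    simp only [pvSweep, pvU_nil, Finset.union_empty, Int.card_Icc]
    omega
  | cons q rest ih =>
    obtain ⟨lo, hi⟩ := q
    intro total cl ch hprop hcl hclp hpw
    rw [List.pairwise_cons] at hpw
    have hlohi : lo ≤ hi := hprop (lo, hi) (by simp)
    have hcllo : cl ≤ lo := hclp (lo, hi) (by simp)
    have hprop' : ∀ p ∈ rest, p.1 ≤ p.2 := fun p hp' => hprop p (by simp [hp'])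
    simp only [pvSweep]
    split_ifs with h1 h2
    · -- merge, extend
      rw [ih total cl hi hprop' (by omega) (fun p hp' => hclp p (by simp [hp'])) hpw.2]
      congr 2
      have : Finset.Icc cl hi ∪ pvU rest = Finset.Icc cl ch ∪ (Finset.Icc lo hi ∪ pvU rest) := by
        ext x
        simp only [Finset.mem_union, Finset.mem_Icc]
        by_cases hP : x ∈ pvU rest <;> simp [hP] <;> omega
      rw [pvU_cons, this]
    · -- merge, subsumed
      rw [ih total cl ch hprop' hcl (fun p hp' => hclp p (by simp [hp'])) hpw.2]
      congr 2
      have : Finset.Icc cl ch ∪ pvU rest = Finset.Icc cl ch ∪ (Finset.Icc lo hi ∪ pvU rest) := by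
        ext x
        simp only [Finset.mem_union, Finset.mem_Icc]
        by_cases hP : x ∈ pvU rest <;> simp [hP] <;> omega
      rw [pvU_cons, this]
    · -- flush
      rw [ih (total + (ch - cl + 1)) lo hi hprop' hlohi (fun p hp' => hpw.1 p hp') hpw.2]
      have hdisj : Disjoint (Finset.Icc cl ch) (Finset.Icc lo hi ∪ pvU rest) := by
        rw [← pvU_cons' lo hi rest]
        apply pvDisjoint_pvU
        intro p hp'
        have hplo : lo ≤ p.1 := by
          rcases List.mem_cons.mp hp' with rfl | h'
          · exact le_refl _
          · exact hpw.1 p h'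
        rw [Finset.disjoint_left]
        intro x hx hx'
        rw [Finset.mem_Icc] at hx hx'
        omega
      rw [pvU_cons, Finset.card_union_of_disjoint hdisj, Int.card_Icc]
      push_cast
      omega

theorem p05b_alt_card (ranges : List (Int × Int)) :
    p05b_alt ranges = ((pvU ranges).card : Int) := by
  unfold p05b_alt
  have hperm : (PySem.List.sorted (ranges.filter (fun r => decide (r.1 ≤ r.2)))
      (fun r => r.1) false).Perm (ranges.filter (fun r => decide (r.1 ≤ r.2))) :=
    PySem.List.sorted_perm _ _ _
  have hUeq : pvU (PySem.List.sorted (ranges.filter (fun r => decide (r.1 ≤ r.2)))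
      (fun r => r.1) false) = pvU ranges := by
    rw [pvU_perm hperm, pvU_filter]
  have hpw : (PySem.List.sorted (ranges.filter (fun r => decide (r.1 ≤ r.2)))
      (fun r => r.1) false).Pairwise (fun a b => a.1 ≤ b.1) :=
    PySem.List.sorted_pairwise _ _
  have hps : ∀ p ∈ PySem.List.sorted (ranges.filter (fun r => decide (r.1 ≤ r.2)))
      (fun r => r.1) false, p.1 ≤ p.2 := by
    intro p hp'
    have := hperm.mem_iff.mp hp'
    rw [List.mem_filter] at this
    exact of_decide_eq_true this.2
  match hs : PySem.List.sorted (ranges.filter (fun r => decide (r.1 ≤ r.2)))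
      (fun r => r.1) false with
  | [] =>
    rw [hs] at hUeq
    rw [hs, ← hUeq, pvU_nil]
    rfl
  | (lo, hi) :: rest =>
    rw [hs] at hUeq hpw hps
    rw [hs]
    rw [List.pairwise_cons] at hpw
    simp only [pvSweep]
    rw [pvSweep_some rest 0 lo hi (fun p hp' => hps p (by simp [hp']))
      (hps (lo, hi) (by simp)) (fun p hp' => hpw.1 p hp') hpw.2]
    rw [← pvU_cons' lo hi rest, hUeq]
    omega

theorem pvExtra_eq_zero (ranges : List (Int × Int)) (hnd : ¬ D_p05b ranges) :
    pvExtra ranges = 0 := by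
  unfold D_p05b at hnd
  match hlast : ranges.getLast? with
  | none => unfold pvExtra; rw [hlast]
  | some l =>
    have hne : ranges ≠ [] := by intro e; rw [e] at hlast; simp at hlast
    have hx : ¬ ∀ l' ∈ ranges.getLast?, l'.2 + 1 < l'.1 := fun h => hnd ⟨h, hne⟩
    rw [hlast] at hx
    simp only [Option.mem_def, Option.some_inj, forall_eq'] at hx
    rw [pvExtra_some ranges l hlast]
    split_ifs with h
    · omega
    · rfl

-- ===== VERDICT (by name: the statements are the Claim_ definitions above) =====
theorem p05b_spec : Claim_unchanged_p05b := by
  intro ranges _ hpre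
  unfold Spec_p05b
  intro hnd
  rw [p05b_val ranges hpre, p05b_alt_card ranges, pvExtra_eq_zero ranges hnd, zero_add]

theorem p05b_changed : Claim_changed_p05b := by unfold Claim_changed_p05b; decide

theorem p05b_tight : Claim_exact_p05b := by
  intro ranges _ hpre hD
  rw [p05b_val ranges hpre, p05b_alt_card ranges]
  obtain ⟨hall, hne⟩ := hD
  have hlx : ∃ l, ranges.getLast? = some l := by
    cases hl : ranges.getLast? with
    | none => exact absurd (List.getLast?_eq_none_iff.mp hl) hne
    | some l => exact ⟨l, rfl⟩
  obtain ⟨l, hl⟩ := hlx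
  have hrev : l.2 + 1 < l.1 := hall l (by rw [Option.mem_def, hl])
  have : pvExtra ranges = l.2 - l.1 + 1 := by
    rw [pvExtra_some ranges l hl, if_pos (by omega)]
  omega
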